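-- pv_equiv track=rewrite | github.com/nettoluis/competitive-programming-python | 2712.py | diaPermitido
-- ===== SOURCE A (Python) =====
-- def diaPermitido(digito):
--     dias = {
--         (1, 2) : 'MONDAY',
--         (3, 4) : 'TUESDAY',
--         (5, 6) : 'WEDNESDAY',
--         (7, 8) : 'THURSDAY',
--         (9, 0) : 'FRIDAY',
-- }
--     for par in dias:
--         if int(digito) in par:
--             return dias[par]
-- ===== SOURCE B (Python) =====
-- def diaPermitido(digito):
--     days = ['MONDAY', 'TUESDAY', 'WEDNESDAY', 'THURSDAY', 'FRIDAY']
--     d = int(digito)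
--     if 0 <= d <= 9:
--         return days[(d - 1) // 2]
-- ===== Notes on version B (the rewrite author's own statement) =====
-- stated objective: simpler
-- what changed: Replaces the dict of digit pairs and the linear scan with a closed-form index days[(d-1)//2] into a list of day names ((0-1)//2 = -1 picks FRIDAY for 0), returning None outside 0..9.
import Mathlib
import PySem

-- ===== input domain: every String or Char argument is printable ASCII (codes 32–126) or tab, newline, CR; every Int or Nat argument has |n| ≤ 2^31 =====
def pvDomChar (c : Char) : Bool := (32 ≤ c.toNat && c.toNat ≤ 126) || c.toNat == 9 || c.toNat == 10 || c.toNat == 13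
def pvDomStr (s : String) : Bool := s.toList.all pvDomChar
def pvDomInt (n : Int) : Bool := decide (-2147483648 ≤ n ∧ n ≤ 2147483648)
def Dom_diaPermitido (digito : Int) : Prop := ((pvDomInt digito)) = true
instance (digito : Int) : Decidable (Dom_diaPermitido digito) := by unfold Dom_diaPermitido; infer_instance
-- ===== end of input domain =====

-- B replaces A's dict of digit pairs and linear scan with a closed-form list index days[(d-1)//2] (simpler).

-- ===== PORT A =====
-- the dict literal, in insertion order
def pvDiasA : List ((Int × Int) × String) :=
  [((1, 2), "MONDAY"), ((3, 4), "TUESDAY"), ((5, 6), "WEDNESDAY"),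
   ((7, 8), "THURSDAY"), ((9, 0), "FRIDAY")]

-- 'for par in dias: if int(digito) in par: return dias[par]'
def pvLoopA (d : Int) : List ((Int × Int) × String) → Option String
  | [] => none
  | (par, v) :: rest => if d = par.1 ∨ d = par.2 then some v else pvLoopA d rest

def diaPermitido (digito : Int) : Option String := pvLoopA digito pvDiasA

-- ===== PORT B =====
def diaPermitido_alt (digito : Int) : Option String :=
  let days := ["MONDAY", "TUESDAY", "WEDNESDAY", "THURSDAY", "FRIDAY"]
  if 0 ≤ digito ∧ digito ≤ 9 then
    PySem.List.pyGet? days (PySem.Int.floordiv (digito - 1) 2)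
  else none

-- ===== PRECONDITION & SPEC =====
def Spec_diaPermitido (digito : Int) (out : Option String) : Prop := out = diaPermitido_alt digito
instance (digito : Int) (out : Option String) : Decidable (Spec_diaPermitido digito out) := by unfold Spec_diaPermitido; infer_instance

-- ===== CLAIM (what is proved, stated in full; the proofs are below) =====
def Claim_equal_diaPermitido : Prop := ∀ (digito : Int), Dom_diaPermitido digito → Spec_diaPermitido digito (diaPermitido digito)

-- ===== LEMMAS AND PROOFS =====

-- ===== VERDICT (by name: the statement is the Claim_ definition above) =====
theorem diaPermitido_spec : Claim_equal_diaPermitido := by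
  intro d _
  unfold Spec_diaPermitido
  by_cases h : 0 ≤ d ∧ d ≤ 9
  · obtain ⟨h1, h2⟩ := h
    interval_cases d <;> decide
  · have h0 : ¬ (d = 0) := by omega
    have h1 : ¬ (d = 1) := by omega
    have h2 : ¬ (d = 2) := by omega
    have h3 : ¬ (d = 3) := by omega
    have h4 : ¬ (d = 4) := by omega
    have h5 : ¬ (d = 5) := by omega
    have h6 : ¬ (d = 6) := by omega
    have h7 : ¬ (d = 7) := by omega
    have h8 : ¬ (d = 8) := by omega
    have h9 : ¬ (d = 9) := by omega
    simp [diaPermitido, diaPermitido_alt, pvLoopA, pvDiasA, h, h0, h1, h2, h3, h4, h5, h6, h7, h8, h9]
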